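-- pv_equiv track=rewrite | github.com/stonsolabs/musical-instruments-platform | backend/app/services/simple_blog_batch_processor.py | _estimate_word_count
-- ===== SOURCE A (Python) =====
-- from typing import Dict, List, Any, Optional
--
-- def _estimate_word_count(content: Dict) -> int:
--     """Estimate total word count of the blog post"""
--     total_words = 0
--
--     for section in content.get('sections', []):
--         if 'content' in section:
--             # Simple word count estimation
--             text = section['content'].replace('#', '').replace('*', '').replace('-', '')
--             words = len(text.split())
--             total_words += words
--
--     return total_words
-- ===== SOURCE B (Python) =====
-- def _estimate_word_count(content):
--     """Estimate total word count of the blog post"""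
--     total = 0
--     for section in content.get('sections', []):
--         if 'content' in section:
--             in_word = False
--             for ch in section['content']:
--                 if ch in '#*-':
--                     continue
--                 if ch.isspace():
--                     in_word = False
--                 elif not in_word:
--                     total += 1
--                     in_word = True
--     return total
-- ===== Notes on version B (the rewrite author's own statement) =====
-- stated objective: alternative
-- what changed: B replaces A's per-section clean-with-replace-then-split-then-count pipeline by a single-pass character finite-state machine that skips '#','*','-', tracks an in-word flag, and counts word starts directly, building no intermediate strings or lists.
import Mathlib
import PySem

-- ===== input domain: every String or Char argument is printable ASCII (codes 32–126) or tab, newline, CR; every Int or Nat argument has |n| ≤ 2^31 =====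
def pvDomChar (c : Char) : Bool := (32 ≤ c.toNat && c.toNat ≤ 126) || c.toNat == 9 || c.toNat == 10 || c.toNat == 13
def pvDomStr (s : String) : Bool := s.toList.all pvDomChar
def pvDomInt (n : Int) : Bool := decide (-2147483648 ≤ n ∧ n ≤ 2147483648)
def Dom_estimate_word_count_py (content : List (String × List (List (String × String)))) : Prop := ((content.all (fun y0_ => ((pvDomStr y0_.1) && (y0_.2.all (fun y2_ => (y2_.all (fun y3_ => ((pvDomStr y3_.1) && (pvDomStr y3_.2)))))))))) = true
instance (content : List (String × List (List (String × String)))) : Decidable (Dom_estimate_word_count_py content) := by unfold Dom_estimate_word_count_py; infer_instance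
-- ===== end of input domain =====

-- B counts words with a single-pass character finite-state machine (skip '#','*','-',
-- reset on whitespace, count word starts) instead of A's replace/split/count pipeline.

-- ===== PORT A =====
def estimate_word_count_py (content : List (String × List (List (String × String)))) : Int :=
  ((PySem.Dict.mk content).getD "sections" []).foldl
    (fun total (sect : List (String × String)) =>
      match (PySem.Dict.mk sect).get? "content" with
      | some t =>
          total + ((PySem.Str.split₀
              (PySem.Str.replace (PySem.Str.replace (PySem.Str.replace t "#" "") "*" "") "-" "")).length : Int)
      | none => total) 0

-- ===== PORT B =====
-- one FSM step: skip markup chars, whitespace closes a word, a non-space char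
-- outside a word starts (and counts) a new word
def pvFsmChar (st : Int × Bool) (c : Char) : Int × Bool :=
  if c == '#' || c == '*' || c == '-' then st
  else if PySem.Chars.isspace c then (st.1, false)
  else if st.2 then st else (st.1 + 1, true)

def estimate_word_count_py_alt (content : List (String × List (List (String × String)))) : Int :=
  ((PySem.Dict.mk content).getD "sections" []).foldl
    (fun total (sect : List (String × String)) =>
      match (PySem.Dict.mk sect).get? "content" with
      | some t => (t.toList.foldl pvFsmChar (total, false)).1
      | none => total) 0

-- ===== PRECONDITION & SPEC =====
def Spec_estimate_word_count_py (content : List (String × List (List (String × String)))) (out : Int) : Prop := out = estimate_word_count_py_alt content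
instance (content : List (String × List (List (String × String)))) (out : Int) : Decidable (Spec_estimate_word_count_py content out) := by unfold Spec_estimate_word_count_py; infer_instance

-- ===== CLAIM =====
def Claim_equal_estimate_word_count_py : Prop := ∀ (content : List (String × List (List (String × String)))), Dom_estimate_word_count_py content → Spec_estimate_word_count_py content (estimate_word_count_py content)

-- ===== LEMMAS AND PROOFS =====

-- word counter: pvWC s b = number of whitespace-separated words in s, given that a
-- word is already open (b = true) coming in
def pvWC : List Char → Bool → Nat
  | [], b => if b then 1 else 0
  | c :: rest, b =>
      if PySem.Chars.isspace c then (if b then 1 else 0) + pvWC rest false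
      else pvWC rest true

-- the three character deletions, as one cleaning function on char lists
def pvClean (l : List Char) : List Char :=
  ((l.filter (fun x => !(x == '#'))).filter (fun x => !(x == '*'))).filter (fun x => !(x == '-'))

theorem split₀_go_len (s : List Char) : ∀ (acc : List (List Char)) (curl : List Char),
    (PySem.Chars.split₀.go s curl acc).length = acc.length + pvWC s (!curl.isEmpty) := by
  induction s with
  | nil =>
      intro acc curl
      cases curl <;> simp [PySem.Chars.split₀.go, pvWC]
  | cons c rest ih =>
      intro acc curl
      by_cases h : PySem.Chars.isspace c
      · cases curl <;> simp [PySem.Chars.split₀.go, h, pvWC, ih] <;> omega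
      · simp only [PySem.Chars.split₀.go]
        rw [if_neg (by simp [h])]
        simp [ih, pvWC, h]

theorem split₀_len (s : List Char) : (PySem.Chars.split₀ s).length = pvWC s false := by
  simpa using split₀_go_len s [] []

theorem replace_go_filter (c : Char) : ∀ (fuel : Nat) (l acc : List Char), l.length ≤ fuel →
    PySem.Chars.replace.go [c] [] fuel l acc = acc.reverse ++ l.filter (fun x => !(x == c)) := by
  intro fuel
  induction fuel with
  | zero =>
      intro l acc h
      have : l = [] := List.eq_nil_of_length_eq_zero (Nat.le_zero.mp h)
      subst this; simp [PySem.Chars.replace.go]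
  | succ n ih =>
      intro l acc h
      match l with
      | [] => simp [PySem.Chars.replace.go]
      | c' :: t =>
          simp only [PySem.Chars.replace.go]
          by_cases hc : c == c'
          · rw [if_pos (by simp [List.isPrefixOf, hc])]
            rw [ih _ _ (by simpa using Nat.le_of_succ_le_succ h)]
            have : (c' == c) = true := beq_iff_eq.mpr (beq_iff_eq.mp hc).symm
            simp [List.filter, this]
          · rw [if_neg (by simp [List.isPrefixOf]; exact fun hh => absurd (by simp [hh]) hc)]
            rw [ih _ _ (by simpa using Nat.le_of_succ_le_succ h)]
            have : (c' == c) = false := by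
              rcases eq_or_ne c' c with h' | h'
              · exact absurd (beq_iff_eq.mpr h'.symm) hc
              · exact beq_eq_false_iff_ne.mpr h'
            simp [List.filter, this]

theorem replace_single (c : Char) (s : List Char) :
    PySem.Chars.replace s [c] [] = s.filter (fun x => !(x == c)) := by
  simp only [PySem.Chars.replace, List.isEmpty]
  rw [if_neg (by simp)]
  simpa using replace_go_filter c s.length s [] le_rfl

-- the per-section count, at the char level
def pvCnt (l : List Char) : Nat := pvWC (pvClean l) false

theorem cnt_str (t : String) :
    ((PySem.Str.split₀
        (PySem.Str.replace (PySem.Str.replace (PySem.Str.replace t "#" "") "*" "") "-" "")).length : Int)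
      = (pvCnt t.toList : Int) := by
  have h : (PySem.Str.replace (PySem.Str.replace (PySem.Str.replace t "#" "") "*" "") "-" "").toList
      = pvClean t.toList := by
    simp only [PySem.Str.toList_replace]
    show PySem.Chars.replace (PySem.Chars.replace (PySem.Chars.replace t.toList ['#'] []) ['*'] []) ['-'] [] = _
    rw [replace_single, replace_single, replace_single]
    rfl
  simp [PySem.Str.split₀, pvCnt, ← h, split₀_len]

theorem pvClean_cons_skip (c : Char) (l : List Char)
    (h : (c == '#' || c == '*' || c == '-') = true) : pvClean (c :: l) = pvClean l := by
  rcases Bool.or_eq_true_iff.mp h with h' | h'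
  · rcases Bool.or_eq_true_iff.mp h' with h'' | h''
    · rw [beq_iff_eq.mp h'']; simp [pvClean, List.filter]
    · rw [beq_iff_eq.mp h'']; simp [pvClean, List.filter]
  · rw [beq_iff_eq.mp h']; simp [pvClean, List.filter]

theorem pvClean_cons_keep (c : Char) (l : List Char)
    (h : (c == '#' || c == '*' || c == '-') = false) : pvClean (c :: l) = c :: pvClean l := by
  have h1 : (c == '#') = false := by cases hx : (c == '#') <;> simp_all
  have h2 : (c == '*') = false := by cases hx : (c == '*') <;> simp_all
  have h3 : (c == '-') = false := by cases hx : (c == '-') <;> simp_all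
  simp only [pvClean, List.filter_cons]
  simp [h1, h2, h3]

-- FSM invariant: total after the scan, plus 1 if a word is still open on entry,
-- equals entry total plus the word count of the cleaned suffix
theorem fsm_inv (l : List Char) : ∀ (t : Int) (b : Bool),
    (l.foldl pvFsmChar (t, b)).1 + (if b then (1 : Int) else 0)
      = t + (pvWC (pvClean l) b : Int) := by
  induction l with
  | nil => intro t b; cases b <;> simp [pvClean, pvWC]
  | cons c rest ih =>
      intro t b
      rw [List.foldl_cons]
      cases hm : (c == '#' || c == '*' || c == '-') with
      | true =>
          rw [pvClean_cons_skip c rest hm]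
          have : pvFsmChar (t, b) c = (t, b) := by simp [pvFsmChar, hm]
          rw [this]; exact ih t b
      | false =>
          rw [pvClean_cons_keep c rest hm]
          by_cases hs : PySem.Chars.isspace c = true
          · have : pvFsmChar (t, b) c = (t, false) := by simp [pvFsmChar, hm, hs]
            rw [this]
            have hih := ih t false
            simp only [if_neg Bool.false_ne_true, add_zero] at hih
            simp only [pvWC, if_pos hs]
            cases b <;> push_cast <;> omega
          · simp only [pvWC, if_neg hs]
            cases b with
            | true =>
                have : pvFsmChar (t, true) c = (t, true) := by simp [pvFsmChar, hm, hs]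
                rw [this]
                exact ih t true
            | false =>
                have : pvFsmChar (t, false) c = (t + 1, true) := by simp [pvFsmChar, hm, hs]
                rw [this]
                have hih := ih (t + 1) true
                simp only [if_pos] at hih
                simp only [if_neg Bool.false_ne_true, add_zero]
                omega

theorem fsm_cnt (t : String) (total : Int) :
    (t.toList.foldl pvFsmChar (total, false)).1 = total + (pvCnt t.toList : Int) := by
  have h := fsm_inv t.toList total false
  simp only [if_neg Bool.false_ne_true, add_zero] at h
  simpa [pvCnt] using h

theorem foldAB_eq (secs : List (List (String × String))) : ∀ (t : Int),
    secs.foldl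
      (fun total (sect : List (String × String)) =>
        match (PySem.Dict.mk sect).get? "content" with
        | some s =>
            total + ((PySem.Str.split₀
                (PySem.Str.replace (PySem.Str.replace (PySem.Str.replace s "#" "") "*" "") "-" "")).length : Int)
        | none => total) t
    = secs.foldl
        (fun total (sect : List (String × String)) =>
          match (PySem.Dict.mk sect).get? "content" with
          | some s => (s.toList.foldl pvFsmChar (total, false)).1
          | none => total) t := by
  induction secs with
  | nil => intro t; rfl
  | cons sect rest ih =>
      intro t
      rw [List.foldl_cons, List.foldl_cons]
      cases h : (PySem.Dict.mk sect).get? "content" with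
      | none => simp only []; exact ih t
      | some s =>
          simp only []
          rw [cnt_str, fsm_cnt]
          exact ih _

-- ===== VERDICT =====
theorem estimate_word_count_py_spec : Claim_equal_estimate_word_count_py := by
  intro content _
  show estimate_word_count_py content = estimate_word_count_py_alt content
  unfold estimate_word_count_py estimate_word_count_py_alt
  exact foldAB_eq _ 0
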